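-- pv_equiv track=rewrite | github.com/joshrobertson8/leetcode26 | array/medium/3561-remove-methods-from-project/2024-10-09 11.34.33 - Accepted - runtime 3166ms - memory 196.1MB.py | remainingMethods
-- ===== SOURCE A (Python) =====
-- def remainingMethods(n, k, invocations):
--     status = [0] * n
--     graph = [[] for _ in range(n)]
--     external_invocation = [False]
--
--     for a, b in invocations:
--         graph[a].append(b)
--
--     def dfs(method):
--         if status[method] == 2:
--             return
--         if status[method] == 1:
--             return
--
--         status[method] = 1
--         for callee in graph[method]:
--             dfs(callee)
--         status[method] = 2
--
--     dfs(k)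
--
--
--     for a, b in invocations:
--         if status[b] != 0 and status[a] == 0:
--             return list(range(n))
--
--     return [i for i in range(n) if status[i] != 1 and status[i] != 2]
-- ===== SOURCE B (Python) =====
-- def remainingMethods(n, k, invocations):
--     graph = [[] for _ in range(n)]
--     for a, b in invocations:
--         graph[a].append(b)
--
--     reachable = [False] * n
--     stack = [k]
--     while stack:
--         m = stack.pop()
--         if not reachable[m]:
--             reachable[m] = True
--             stack.extend(graph[m])
--
--     for a, b in invocations:
--         if reachable[b] and not reachable[a]:
--             return list(range(n))
--
--     return [i for i in range(n) if not reachable[i]]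
-- ===== Notes on version B (the rewrite author's own statement) =====
-- stated objective: alternative
-- what changed: Replaces the recursive three-state DFS with an iterative boolean worklist: push k, pop a node, mark it reachable and push its callees; the external-invocation scan and the final filter then test the single boolean instead of the 1/2 status codes.
import Mathlib
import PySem

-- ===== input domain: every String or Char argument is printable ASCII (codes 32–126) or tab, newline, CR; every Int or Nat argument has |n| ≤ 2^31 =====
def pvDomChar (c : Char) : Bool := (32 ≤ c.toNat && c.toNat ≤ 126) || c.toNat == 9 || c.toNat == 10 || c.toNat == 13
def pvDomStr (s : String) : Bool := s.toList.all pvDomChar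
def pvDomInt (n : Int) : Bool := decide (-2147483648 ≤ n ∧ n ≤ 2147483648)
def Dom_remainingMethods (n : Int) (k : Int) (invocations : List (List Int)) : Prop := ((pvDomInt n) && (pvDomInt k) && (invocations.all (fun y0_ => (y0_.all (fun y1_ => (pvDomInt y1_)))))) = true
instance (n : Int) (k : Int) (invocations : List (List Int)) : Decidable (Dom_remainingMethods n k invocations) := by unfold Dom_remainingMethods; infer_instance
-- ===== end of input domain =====

-- B replaces A's recursive three-state DFS by an iterative boolean worklist (same graph build, same scans); alternative decomposition, return value only.

-- Python list index normalisation (valid indices only; Pre_ guarantees -len ≤ m < len)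
def pvIdx (len : Nat) (m : Int) : Nat := (if m < 0 then m + len else m).toNat

-- shared by both ports: Python's `for a, b in invocations: graph[a].append(b)` (identical in A and B)
def pvGraph (len : Nat) (invocations : List (List Int)) : List (List Int) :=
  invocations.foldl (fun g row => g.modify (pvIdx len (row.getD 0 0)) (fun l => l ++ [row.getD 1 0]))
    (List.replicate len [])

-- ===== PORT A =====
-- A's recursive dfs; `fuel` is only a totality guard (Python's recursion needs none); fuel = len+1 is always enough
def dfsA (g : List (List Int)) : Nat → Int → List Int → List Int
  | 0, _, s => s
  | f + 1, m, s =>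
    let i := pvIdx s.length m
    if s.getD i 0 = 2 then s
    else if s.getD i 0 = 1 then s
    else
      let s1 := s.set i 1
      let s2 := (g.getD i []).foldl (fun acc c => dfsA g f c acc) s1
      s2.set i 2

def remainingMethods (n : Int) (k : Int) (invocations : List (List Int)) : List Int :=
  let len := n.toNat
  let g := pvGraph len invocations
  let status := dfsA g (len + 1) k (List.replicate len 0)
  if invocations.any (fun row =>
      (status.getD (pvIdx len (row.getD 1 0)) 0 != 0) && (status.getD (pvIdx len (row.getD 0 0)) 0 == 0)) then
    PySem.List.pyRange 0 n 1
  else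
    (PySem.List.pyRange 0 n 1).filter (fun i =>
      (status.getD (pvIdx len i) 0 != 1) && (status.getD (pvIdx len i) 0 != 2))

-- lemma cited by loopB's decreasing_by
theorem pvSetTrueCount (R : List Bool) (i : Nat) (h : R.getD i true = false) :
    (R.set i true).count false < R.count false := by
  induction R generalizing i with
  | nil => simp [List.getD] at h
  | cons a R ih =>
    cases i with
    | zero =>
      simp [List.getD] at h
      subst h
      simp
    | succ j =>
      have := ih j (by simpa [List.getD] using h)
      simp only [List.set, List.count_cons]
      omega

-- ===== PORT B =====
-- B's worklist loop; the stack is kept top-first (Python pushes with extend and pops from the end)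
def loopB (g : List (List Int)) (len : Nat) : List Bool → List Int → List Bool
  | R, [] => R
  | R, m :: st =>
    let i := pvIdx len m
    if R.getD i true then loopB g len R st
    else loopB g len (R.set i true) ((g.getD i []).reverse ++ st)
termination_by R st => (R.count false, st.length)
decreasing_by
  · exact Prod.Lex.right _ (by simp)
  · rename_i h
    exact Prod.Lex.left _ _ (pvSetTrueCount R (pvIdx len m) (by simpa using h))

def remainingMethods_alt (n : Int) (k : Int) (invocations : List (List Int)) : List Int :=
  let len := n.toNat
  let g := pvGraph len invocations
  let reachable := loopB g len (List.replicate len false) [k]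
  if invocations.any (fun row =>
      (reachable.getD (pvIdx len (row.getD 1 0)) false) && (!(reachable.getD (pvIdx len (row.getD 0 0)) false))) then
    PySem.List.pyRange 0 n 1
  else
    (PySem.List.pyRange 0 n 1).filter (fun i => !(reachable.getD (pvIdx len i) false))

-- ===== PRECONDITION & SPEC =====
-- Pre_ excludes exactly the inputs on which A raises: k or an invocation entry outside Python's
-- valid index range [-n, n), or an invocation row that is not a pair (ValueError on unpacking).
def Pre_remainingMethods (n : Int) (k : Int) (invocations : List (List Int)) : Prop :=
  (-n ≤ k ∧ k < n) ∧
  ∀ row ∈ invocations, row.length = 2 ∧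
    (-n ≤ row.getD 0 0 ∧ row.getD 0 0 < n) ∧ (-n ≤ row.getD 1 0 ∧ row.getD 1 0 < n)

instance (n : Int) (k : Int) (invocations : List (List Int)) : Decidable (Pre_remainingMethods n k invocations) := by
  unfold Pre_remainingMethods; infer_instance

def pvWitness_remainingMethods : Int × Int × List (List Int) := (4, 1, [[1, 2], [2, 1], [3, 0]])

def Spec_remainingMethods (n : Int) (k : Int) (invocations : List (List Int)) (out : List Int) : Prop := out = remainingMethods_alt n k invocations
instance (n : Int) (k : Int) (invocations : List (List Int)) (out : List Int) : Decidable (Spec_remainingMethods n k invocations out) := by unfold Spec_remainingMethods; infer_instance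

-- ===== CLAIM (what is proved, stated in full; the proofs are below) =====
def Claim_equal_remainingMethods : Prop := ∀ (n : Int) (k : Int) (invocations : List (List Int)), Dom_remainingMethods n k invocations → Pre_remainingMethods n k invocations → Spec_remainingMethods n k invocations (remainingMethods n k invocations)

-- ===== LEMMAS AND PROOFS =====

-- abstract reachability shared by both correctness arguments
def pvE (g : List (List Int)) (len : Nat) (a c : Int) : Prop := c ∈ g.getD (pvIdx len a) []
def pvOK (n x : Int) : Prop := -n ≤ x ∧ x < n
def pvMarked (s : List Int) (j : Nat) : Prop := s.getD j 0 = 1 ∨ s.getD j 0 = 2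
def pvZC (s : List Int) : Nat := s.countP (fun v => !(v == 1 || v == 2))
def pvInvA (g : List (List Int)) (len : Nat) (s : List Int) : Prop :=
  ∀ p c, s.getD p 0 = 2 → c ∈ g.getD p [] → pvMarked s (pvIdx len c)
def pvInvB (g : List (List Int)) (len : Nat) (R : List Bool) (st : List Int) : Prop :=
  ∀ p c, R.getD p false = true → c ∈ g.getD p [] → R.getD (pvIdx len c) false = true ∨ c ∈ st

theorem pvGetD_set {α : Type} (s : List α) (i j : Nat) (v d : α) :
    (s.set i v).getD j d = if j = i ∧ i < s.length then v else s.getD j d := by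
  simp [List.getD_eq_getElem?_getD, List.getElem?_set]
  split_ifs with h1 h2 h3 h4 <;> try omega
  all_goals simp_all

theorem pvCountP_le {α : Type} (p : α → Bool) (d : α) :
    ∀ (s t : List α), s.length = t.length → (∀ j, p (t.getD j d) = true → p (s.getD j d) = true) →
      t.countP p ≤ s.countP p := by
  intro s
  induction s with
  | nil => intro t hl _; cases t <;> simp_all
  | cons a s ih =>
    intro t hl hp
    cases t with
    | nil => simp
    | cons b t =>
      simp only [List.countP_cons]
      have h0 := hp 0
      have := ih t (by simpa using hl) (fun j => hp (j+1))
      simp [List.getD] at h0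
      by_cases hb : p b = true <;> by_cases ha : p a = true <;> simp_all <;> omega

theorem pvCountP_set_lt {α : Type} (p : α → Bool) (d : α) :
    ∀ (s : List α) (i : Nat) (v : α), i < s.length → p (s.getD i d) = true → p v = false →
    (s.set i v).countP p < s.countP p := by
  intro s
  induction s with
  | nil => simp
  | cons a s ih =>
    intro i v hi hold hnew
    cases i with
    | zero =>
      simp [List.getD] at hold
      simp [hold, hnew]
    | succ j =>
      have := ih j v (by simpa using hi) (by simpa [List.getD] using hold) hnew
      simp only [List.set, List.countP_cons]
      omega

theorem pvFold_mem (len : Nat) (inv : List (List Int)) : ∀ (g0 : List (List Int)) (p : Nat) (c : Int),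
    c ∈ (inv.foldl (fun g row => g.modify (pvIdx len (row.getD 0 0)) (fun l => l ++ [row.getD 1 0])) g0).getD p [] →
    c ∈ g0.getD p [] ∨ ∃ row ∈ inv, c = row.getD 1 0 := by
  intro g0 p c
  induction inv generalizing g0 with
  | nil => intro h; exact Or.inl h
  | cons row inv ih =>
    intro h
    rw [List.foldl_cons] at h
    rcases ih _ h with h' | h'
    ·
      have key : c ∈ g0.getD p [] ∨ c = row.getD 1 0 := by
        rcases hg : g0[p]? with _ | l
        · simp [List.getD, List.getElem?_modify, hg] at h'
        · by_cases hp : pvIdx len (row[0]?.getD 0) = p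
          · simp [List.getD, List.getElem?_modify, hg, hp] at h'
            rcases h' with h1 | h1
            · exact Or.inl (by simpa [List.getD, hg] using h1)
            · exact Or.inr (by simpa [List.getD] using h1)
          · simp [List.getD, List.getElem?_modify, hg, hp] at h'
            exact Or.inl (by simpa [List.getD, hg] using h')
      rcases key with h2 | h2
      · exact Or.inl h2
      · exact Or.inr ⟨row, by simp, h2⟩
    · right; rcases h' with ⟨r, hr, hc⟩; exact ⟨r, by simp [hr], hc⟩

theorem pvGraph_mem (len : Nat) (inv : List (List Int)) (p : Nat) (c : Int)
    (h : c ∈ (pvGraph len inv).getD p []) : ∃ row ∈ inv, c = row.getD 1 0 := by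
  rcases pvFold_mem len inv _ p c h with h' | h'
  · rcases Nat.lt_or_ge p len with hp | hp
    · simp [List.getD, List.getElem?_replicate, hp] at h'
    · simp [List.getD, List.getElem?_replicate, Nat.not_lt.2 hp] at h'
  · exact h'

theorem pvIdx_lt (n : Int) (x : Int) (h : pvOK n x) : pvIdx n.toNat x < n.toNat := by
  rcases h with ⟨h1, h2⟩
  unfold pvIdx
  split_ifs with hx <;> omega

theorem dfsA_length (g : List (List Int)) :
    ∀ f m s, (dfsA g f m s).length = s.length := by
  intro f
  induction f with
  | zero => intro m s; rfl
  | succ f ih =>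
    intro m s
    have hfold : ∀ (cs : List Int) (t : List Int),
        (cs.foldl (fun acc c => dfsA g f c acc) t).length = t.length := by
      intro cs
      induction cs with
      | nil => intro t; rfl
      | cons c cs ihc => intro t; rw [List.foldl_cons, ihc, ih]
    simp only [dfsA]
    split_ifs <;> simp [hfold]

theorem foldA_length (g : List (List Int)) (f : Nat) :
    ∀ (cs : List Int) (t : List Int),
      (cs.foldl (fun acc c => dfsA g f c acc) t).length = t.length := by
  intro cs
  induction cs with
  | nil => intro t; rfl
  | cons c cs ihc => intro t; rw [List.foldl_cons, ihc, dfsA_length]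

theorem pvMarked_set (s : List Int) (i j : Nat) (v : Int) (hv : v = 1 ∨ v = 2)
    (h : pvMarked s j) : pvMarked (s.set i v) j := by
  unfold pvMarked at *
  rw [pvGetD_set]
  split_ifs with h1
  · rcases hv with hv | hv <;> simp [hv]
  · exact h

theorem dfsA_markmono (g : List (List Int)) :
    ∀ f m s j, pvMarked s j → pvMarked (dfsA g f m s) j := by
  intro f
  induction f with
  | zero => intro m s j h; exact h
  | succ f ih =>
    intro m s j h
    have hfold : ∀ (cs : List Int) (t : List Int) (j : Nat), pvMarked t j →
        pvMarked (cs.foldl (fun acc c => dfsA g f c acc) t) j := by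
      intro cs
      induction cs with
      | nil => intro t j h; exact h
      | cons c cs ihc => intro t j h; rw [List.foldl_cons]; exact ihc _ _ (ih _ _ _ h)
    simp only [dfsA]
    split_ifs
    · exact h
    · exact h
    · exact pvMarked_set _ _ _ _ (Or.inr rfl) (hfold _ _ _ (pvMarked_set _ _ _ _ (Or.inl rfl) h))

theorem foldA_markmono (g : List (List Int)) (f : Nat) :
    ∀ (cs : List Int) (t : List Int) (j : Nat), pvMarked t j →
      pvMarked (cs.foldl (fun acc c => dfsA g f c acc) t) j := by
  intro cs
  induction cs with
  | nil => intro t j h; exact h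
  | cons c cs ihc => intro t j h; rw [List.foldl_cons]; exact ihc _ _ (dfsA_markmono _ _ _ _ _ h)

theorem dfsA_ones (g : List (List Int)) :
    ∀ f m s j, (dfsA g f m s).getD j 0 = 1 → s.getD j 0 = 1 := by
  intro f
  induction f with
  | zero => intro m s j h; exact h
  | succ f ih =>
    intro m s j h
    have hfold : ∀ (cs : List Int) (t : List Int) (j : Nat),
        (cs.foldl (fun acc c => dfsA g f c acc) t).getD j 0 = 1 → t.getD j 0 = 1 := by
      intro cs
      induction cs with
      | nil => intro t j h; exact h
      | cons c cs ihc => intro t j h; rw [List.foldl_cons] at h; exact ih _ _ _ (ihc _ _ h)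
    simp only [dfsA] at h
    split_ifs at h
    · exact h
    · exact h
    · rw [pvGetD_set] at h
      split_ifs at h with h1
      · exact absurd h (by norm_num)
      · rw [foldA_length, List.length_set] at h1
        have h2 := hfold _ _ _ h
        rw [pvGetD_set, if_neg h1] at h2
        exact h2

theorem pvVals_set (s : List Int) (i : Nat) (v : Int) (hv : v = 1 ∨ v = 2)
    (h : ∀ j, s.getD j 0 = 0 ∨ s.getD j 0 = 1 ∨ s.getD j 0 = 2) :
    ∀ j, (s.set i v).getD j 0 = 0 ∨ (s.set i v).getD j 0 = 1 ∨ (s.set i v).getD j 0 = 2 := by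
  intro j
  rw [pvGetD_set]
  split_ifs with h1
  · rcases hv with hv | hv <;> simp [hv]
  · exact h j

theorem dfsA_vals (g : List (List Int)) :
    ∀ f m s, (∀ j, s.getD j 0 = 0 ∨ s.getD j 0 = 1 ∨ s.getD j 0 = 2) →
      ∀ j, (dfsA g f m s).getD j 0 = 0 ∨ (dfsA g f m s).getD j 0 = 1 ∨ (dfsA g f m s).getD j 0 = 2 := by
  intro f
  induction f with
  | zero => intro m s h; exact h
  | succ f ih =>
    intro m s h
    have hfold : ∀ (cs : List Int) (t : List Int),
        (∀ j, t.getD j 0 = 0 ∨ t.getD j 0 = 1 ∨ t.getD j 0 = 2) →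
        ∀ j, ((cs.foldl (fun acc c => dfsA g f c acc) t).getD j 0 = 0 ∨
          (cs.foldl (fun acc c => dfsA g f c acc) t).getD j 0 = 1 ∨
          (cs.foldl (fun acc c => dfsA g f c acc) t).getD j 0 = 2) := by
      intro cs
      induction cs with
      | nil => intro t h; exact h
      | cons c cs ihc => intro t h; rw [List.foldl_cons]; exact ihc _ (ih _ _ h)
    simp only [dfsA]
    split_ifs
    · exact h
    · exact h
    · exact pvVals_set _ _ _ (Or.inr rfl) (hfold _ _ (pvVals_set _ _ _ (Or.inl rfl) h))

theorem dfsA_sound (g : List (List Int)) (len : Nat) :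
    ∀ f m s, s.length = len →
      ∀ j, (dfsA g f m s).getD j 0 ≠ 0 →
        s.getD j 0 ≠ 0 ∨ ∃ x, Relation.ReflTransGen (pvE g len) m x ∧ pvIdx len x = j := by
  intro f
  induction f with
  | zero => intro m s _ j h; exact Or.inl h
  | succ f ih =>
    intro m s hs j h
    subst hs
    have hfold : ∀ (cs : List Int) (t : List Int), t.length = s.length → ∀ j,
        (cs.foldl (fun acc c => dfsA g f c acc) t).getD j 0 ≠ 0 →
        t.getD j 0 ≠ 0 ∨ ∃ c ∈ cs, ∃ x, Relation.ReflTransGen (pvE g s.length) c x ∧ pvIdx s.length x = j := by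
      intro cs
      induction cs with
      | nil => intro t _ j h; exact Or.inl h
      | cons c cs ihc =>
        intro t ht j h
        rw [List.foldl_cons] at h
        rcases ihc _ (by rw [dfsA_length]; exact ht) j h with h' | ⟨c', hc', hx⟩
        · rcases ih c t ht j h' with h'' | hx
          · exact Or.inl h''
          · exact Or.inr ⟨c, by simp, hx⟩
        · exact Or.inr ⟨c', by simp [hc'], hx⟩
    simp only [dfsA] at h
    split_ifs at h with h1 h2
    · exact Or.inl h
    · exact Or.inl h
    · rw [pvGetD_set] at h
      rw [foldA_length, List.length_set] at h
      by_cases hji : j = pvIdx s.length m ∧ pvIdx s.length m < s.length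
      · exact Or.inr ⟨m, Relation.ReflTransGen.refl, hji.1.symm⟩
      · rw [if_neg hji] at h
        rcases hfold _ _ (by simp) j h with h' | ⟨c, hc, x, hx1, hx2⟩
        · rw [pvGetD_set, if_neg hji] at h'
          exact Or.inl h'
        · exact Or.inr ⟨x, Relation.ReflTransGen.head hc hx1, hx2⟩

theorem dfsA_zc (g : List (List Int)) (f : Nat) (m : Int) (s : List Int) :
    pvZC (dfsA g f m s) ≤ pvZC s := by
  unfold pvZC
  apply pvCountP_le _ (0 : Int) s _ (dfsA_length g f m s).symm
  intro j hj
  by_cases hm : pvMarked s j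
  · have h2 := dfsA_markmono g f m s j hm
    unfold pvMarked at h2
    simp [List.getD] at h2 hj
    rcases h2 with h | h
    · exact absurd h hj.1
    · exact absurd h hj.2
  · have h1 : s.getD j 0 ≠ 1 := fun h => hm (Or.inl h)
    have h2 : s.getD j 0 ≠ 2 := fun h => hm (Or.inr h)
    simp [List.getD] at h1 h2 ⊢
    exact ⟨h1, h2⟩

theorem dfsA_complete (g : List (List Int)) (len : Nat) (n : Int) (hn : 0 < n) (hlen : len = n.toNat)
    (hG : ∀ p c, c ∈ g.getD p [] → pvOK n c) :
    ∀ f m s, s.length = len → pvOK n m → pvZC s ≤ f → pvInvA g len s →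
      pvInvA g len (dfsA g f m s) ∧ pvMarked (dfsA g f m s) (pvIdx len m) := by
  intro f
  induction f with
  | zero =>
    intro m s hs hm hzc hInv
    refine ⟨hInv, ?_⟩
    have hi : pvIdx len m < len := by rw [hlen]; exact pvIdx_lt n m hm
    have hzc0 : pvZC s = 0 := Nat.le_zero.mp hzc
    unfold pvZC at hzc0
    have hall := List.countP_eq_zero.mp hzc0
    have hilt : pvIdx len m < s.length := by omega
    have hmem : s.getD (pvIdx len m) 0 ∈ s := by
      rw [List.getD_eq_getElem s 0 hilt]
      exact List.getElem_mem hilt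
    have hv := hall _ hmem
    unfold pvMarked
    simp at hv
    tauto
  | succ f ih =>
    intro m s hs hm hzc hInv
    have hi : pvIdx len m < len := by rw [hlen]; exact pvIdx_lt n m hm
    have hilt : pvIdx len m < s.length := by omega
    simp only [dfsA]
    rw [hs]
    by_cases h1 : s.getD (pvIdx len m) 0 = 2
    · rw [if_pos h1]
      exact ⟨hInv, Or.inr h1⟩
    · rw [if_neg h1]
      by_cases h2 : s.getD (pvIdx len m) 0 = 1
      · rw [if_pos h2]
        exact ⟨hInv, Or.inl h2⟩
      · rw [if_neg h2]
        have hzc1 : pvZC (s.set (pvIdx len m) 1) ≤ f := by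
          have hlt := pvCountP_set_lt (fun v => !(v == 1 || v == 2)) 0 s (pvIdx len m) 1 hilt
            (by simp [List.getD] at h1 h2 ⊢; exact ⟨h2, h1⟩) (by decide)
          unfold pvZC at *
          omega
        have hInv1 : pvInvA g len (s.set (pvIdx len m) 1) := by
          intro p c hp hc
          rw [pvGetD_set] at hp
          split_ifs at hp with hcase
          · exact absurd hp (by norm_num)
          · exact pvMarked_set _ _ _ _ (Or.inl rfl) (hInv p c hp hc)
        have hfold : ∀ (cs : List Int), (∀ c ∈ cs, pvOK n c) → ∀ (t : List Int),
            t.length = len → pvZC t ≤ f → pvInvA g len t →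
            pvInvA g len (cs.foldl (fun acc c => dfsA g f c acc) t) ∧
            (∀ c ∈ cs, pvMarked (cs.foldl (fun acc c => dfsA g f c acc) t) (pvIdx len c)) := by
          intro cs
          induction cs with
          | nil => intro _ t _ _ hInvT; exact ⟨hInvT, by simp⟩
          | cons c cs ihc =>
            intro hOK t ht hzct hInvT
            rw [List.foldl_cons]
            have hstep := ih c t ht (hOK c (by simp)) hzct hInvT
            have hrest := ihc (fun c' hc' => hOK c' (by simp [hc'])) (dfsA g f c t)
              (by rw [dfsA_length]; exact ht) (Nat.le_trans (dfsA_zc g f c t) hzct) hstep.1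
            refine ⟨hrest.1, ?_⟩
            intro c' hc'
            rcases List.mem_cons.mp hc' with rfl | hc'
            · exact foldA_markmono g f cs _ _ hstep.2
            · exact hrest.2 c' hc'
        have hOKbucket : ∀ c ∈ g.getD (pvIdx len m) [], pvOK n c := fun c hc => hG _ c hc
        have hs2 := hfold (g.getD (pvIdx len m) []) hOKbucket (s.set (pvIdx len m) 1)
          (by rw [List.length_set]; exact hs) hzc1 hInv1
        have hlen2 : ((g.getD (pvIdx len m) []).foldl (fun acc c => dfsA g f c acc)
            (s.set (pvIdx len m) 1)).length = len := by
          rw [foldA_length, List.length_set]; exact hs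
        constructor
        · intro p c hp hc
          rw [pvGetD_set] at hp
          by_cases hpc : p = pvIdx len m ∧ pvIdx len m <
              ((g.getD (pvIdx len m) []).foldl (fun acc c => dfsA g f c acc) (s.set (pvIdx len m) 1)).length
          · have hcm := hs2.2 c (by rw [← hpc.1]; exact hc)
            exact pvMarked_set _ _ _ _ (Or.inr rfl) hcm
          · rw [if_neg hpc] at hp
            exact pvMarked_set _ _ _ _ (Or.inr rfl) (hs2.1 p c hp hc)
        · unfold pvMarked
          rw [pvGetD_set, if_pos ⟨rfl, by omega⟩]
          exact Or.inr rfl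

theorem loopB_mono (g : List (List Int)) (len : Nat) :
    ∀ R st j, R.getD j false = true → (loopB g len R st).getD j false = true := by
  intro R st
  induction R, st using loopB.induct g len with
  | case1 R => intro j h; rw [loopB]; exact h
  | case2 R m st i h ih => intro j hj; rw [loopB, if_pos h]; exact ih j hj
  | case3 R m st i h ih =>
    intro j hj
    rw [loopB, if_neg h]
    apply ih
    rw [pvGetD_set]
    split_ifs
    · rfl
    · exact hj

theorem loopB_sound (g : List (List Int)) (len : Nat) :
    ∀ R st j, (loopB g len R st).getD j false = true →
      R.getD j false = true ∨ ∃ m ∈ st, ∃ x, Relation.ReflTransGen (pvE g len) m x ∧ pvIdx len x = j := by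
  intro R st
  induction R, st using loopB.induct g len with
  | case1 R => intro j h; rw [loopB] at h; exact Or.inl h
  | case2 R m st i h ih =>
    intro j hj
    rw [loopB, if_pos h] at hj
    rcases ih j hj with h' | ⟨m', hm', hx⟩
    · exact Or.inl h'
    · exact Or.inr ⟨m', by simp [hm'], hx⟩
  | case3 R m st i h ih =>
    intro j hj
    rw [loopB, if_neg h] at hj
    rcases ih j hj with h' | ⟨m', hm', x, hx1, hx2⟩
    · rw [pvGetD_set] at h'
      split_ifs at h' with hcase
      · exact Or.inr ⟨m, by simp, m, Relation.ReflTransGen.refl, hcase.1.symm⟩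
      · exact Or.inl h'
    · rcases List.mem_append.mp hm' with hrev | hst
      · have hbucket : m' ∈ g.getD i [] := List.mem_reverse.mp hrev
        exact Or.inr ⟨m, by simp, x, Relation.ReflTransGen.head hbucket hx1, hx2⟩
      · exact Or.inr ⟨m', by simp [hst], x, hx1, hx2⟩

theorem loopB_complete (g : List (List Int)) (len : Nat) (n : Int) (hn : 0 < n) (hlen : len = n.toNat)
    (hG : ∀ p c, c ∈ g.getD p [] → pvOK n c) :
    ∀ R st, R.length = len → (∀ m ∈ st, pvOK n m) → pvInvB g len R st →
      (∀ p c, (loopB g len R st).getD p false = true → c ∈ g.getD p [] →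
        (loopB g len R st).getD (pvIdx len c) false = true) ∧
      (∀ m ∈ st, (loopB g len R st).getD (pvIdx len m) false = true) := by
  intro R st
  induction R, st using loopB.induct g len with
  | case1 R =>
    intro hR hst hInv
    rw [loopB]
    refine ⟨?_, by simp⟩
    intro p c hp hc
    rcases hInv p c hp hc with h' | h'
    · exact h'
    · simp at h'
  | case2 R m st i h ih =>
    intro hR hst hInv
    rw [loopB, if_pos h]
    have hiR : i < R.length := by
      have := pvIdx_lt n m (hst m (by simp))
      rw [← hlen] at this
      omega
    have hm' : R.getD i false = true := by
      rw [List.getD_eq_getElem R false hiR]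
      rw [List.getD_eq_getElem R true hiR] at h
      exact h
    have hrec := ih hR (fun m' hm => hst m' (by simp [hm])) ?_
    · refine ⟨hrec.1, ?_⟩
      intro m' hmem
      rcases List.mem_cons.mp hmem with rfl | hmem
      · exact loopB_mono g len R st i hm'
      · exact hrec.2 m' hmem
    · intro p c hp hc
      rcases hInv p c hp hc with h' | h'
      · exact Or.inl h'
      · rcases List.mem_cons.mp h' with rfl | h''
        · exact Or.inl hm'
        · exact Or.inr h''
  | case3 R m st i h ih =>
    intro hR hst hInv
    rw [loopB, if_neg h]
    have hiR : i < R.length := by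
      have := pvIdx_lt n m (hst m (by simp))
      rw [← hlen] at this
      omega
    have hset : (R.set i true).getD i false = true := by
      rw [pvGetD_set, if_pos ⟨rfl, hiR⟩]
    have hrec := ih ?_ ?_ ?_
    · refine ⟨hrec.1, ?_⟩
      intro m' hmem
      rcases List.mem_cons.mp hmem with rfl | hmem
      · exact loopB_mono g len _ _ i hset
      · exact hrec.2 m' (by simp [hmem])
    · rw [List.length_set]; exact hR
    · intro m' hm'
      rcases List.mem_append.mp hm' with hrev | hst'
      · exact hG i m' (List.mem_reverse.mp hrev)
      · exact hst m' (by simp [hst'])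
    · intro p c hp hc
      rw [pvGetD_set] at hp
      split_ifs at hp with hcase
      · refine Or.inr (List.mem_append.mpr (Or.inl ?_))
        rw [← hcase.1]
        exact List.mem_reverse.mpr hc
      · rcases hInv p c hp hc with h' | h'
        · refine Or.inl ?_
          rw [pvGetD_set]
          split_ifs
          · rfl
          · exact h'
        · rcases List.mem_cons.mp h' with rfl | h''
          · exact Or.inl hset
          · exact Or.inr (List.mem_append.mpr (Or.inr h''))

-- the central bridge: A's status is nonzero exactly where B's boolean is true
theorem pvGetD_replicate {α : Type} (L : Nat) (a : α) (j : Nat) :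
    (List.replicate L a).getD j a = a := by
  simp [List.getD, List.getElem?_replicate]
  split <;> rfl

-- the central bridge: A's status is nonzero exactly where B's boolean is true (and A's values stay in {0,1,2})
theorem pvMain (n k : Int) (inv : List (List Int)) (hPre : Pre_remainingMethods n k inv) :
    ∀ j, ((dfsA (pvGraph n.toNat inv) (n.toNat + 1) k (List.replicate n.toNat 0)).getD j 0 ≠ 0 ↔
      (loopB (pvGraph n.toNat inv) n.toNat (List.replicate n.toNat false) [k]).getD j false = true) ∧
      ((dfsA (pvGraph n.toNat inv) (n.toNat + 1) k (List.replicate n.toNat 0)).getD j 0 = 0 ∨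
       (dfsA (pvGraph n.toNat inv) (n.toNat + 1) k (List.replicate n.toNat 0)).getD j 0 = 1 ∨
       (dfsA (pvGraph n.toNat inv) (n.toNat + 1) k (List.replicate n.toNat 0)).getD j 0 = 2) := by
  obtain ⟨⟨hk1, hk2⟩, hrows⟩ := hPre
  have hn : 0 < n := by omega
  have hk : pvOK n k := ⟨hk1, hk2⟩
  set len := n.toNat with hlen
  set g := pvGraph len inv with hg
  have hG : ∀ p c, c ∈ g.getD p [] → pvOK n c := by
    intro p c hc
    obtain ⟨row, hrow, rfl⟩ := pvGraph_mem len inv p c hc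
    obtain ⟨-, -, hb⟩ := hrows row hrow
    exact hb
  have hS0 : ∀ j, (List.replicate len (0 : Int)).getD j 0 = 0 := fun j => pvGetD_replicate len 0 j
  have hR0 : ∀ j, (List.replicate len false).getD j false = false := fun j => pvGetD_replicate len false j
  -- A side
  have hcomp := dfsA_complete g len n hn rfl hG (len + 1) k (List.replicate len 0)
    (by simp) hk
    (by unfold pvZC; calc (List.replicate len (0:Int)).countP _ ≤ (List.replicate len (0:Int)).length := List.countP_le_length
          _ ≤ len + 1 := by simp)
    (fun p c hp _ => by rw [hS0 p] at hp; exact absurd hp (by norm_num))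
  set S := dfsA g (len + 1) k (List.replicate len 0) with hSdef
  have hvals : ∀ j, S.getD j 0 = 0 ∨ S.getD j 0 = 1 ∨ S.getD j 0 = 2 :=
    dfsA_vals g (len + 1) k _ (fun j => Or.inl (hS0 j))
  have hones : ∀ j, S.getD j 0 ≠ 1 := by
    intro j h
    have := dfsA_ones g (len + 1) k _ j h
    rw [hS0 j] at this
    exact absurd this (by norm_num)
  have hReachA : ∀ x, Relation.ReflTransGen (pvE g len) k x → pvMarked S (pvIdx len x) := by
    intro x h
    induction h with
    | refl => exact hcomp.2
    | tail hab he ih =>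
      rename_i b c
      have h2 : S.getD (pvIdx len b) 0 = 2 := by
        rcases ih with h' | h'
        · exact absurd h' (hones _)
        · exact h'
      exact hcomp.1 (pvIdx len b) c h2 he
  -- B side
  have hcompB := loopB_complete g len n hn rfl hG (List.replicate len false) [k]
    (by simp) (by intro m hm; simp at hm; subst hm; exact hk)
    (fun p c hp _ => by rw [hR0 p] at hp; exact absurd hp (by simp))
  set R := loopB g len (List.replicate len false) [k] with hRdef
  have hRk : R.getD (pvIdx len k) false = true := hcompB.2 k (by simp)
  have hReachB : ∀ x, Relation.ReflTransGen (pvE g len) k x → R.getD (pvIdx len x) false = true := by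
    intro x h
    induction h with
    | refl => exact hRk
    | tail hab he ih =>
      rename_i b c
      exact hcompB.1 (pvIdx len b) c ih he
  intro j
  refine ⟨⟨?_, ?_⟩, hvals j⟩
  · intro h
    rcases dfsA_sound g len (len + 1) k _ (by simp) j h with h' | ⟨x, hx1, hx2⟩
    · exact absurd (hS0 j) h'
    · rw [← hx2]
      exact hReachB x hx1
  · intro h
    rcases loopB_sound g len _ _ j h with h' | ⟨m, hm, x, hx1, hx2⟩
    · rw [hR0 j] at h'
      exact absurd h' (by simp)
    · simp at hm
      subst hm
      rw [← hx2]
      have := hReachA x hx1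
      rcases this with h' | h' <;> rw [h'] <;> norm_num

theorem pvBoolNe (x : Int) (b : Bool) (h : x ≠ 0 ↔ b = true) : (x != 0) = b := by
  cases b
  · have hx : x = 0 := by
      by_contra hc
      exact absurd (h.mp hc) (by simp)
    simp [hx]
  · have hx : x ≠ 0 := h.mpr rfl
    simp [hx]

theorem pvBoolEq (x : Int) (b : Bool) (h : x ≠ 0 ↔ b = true) : (x == 0) = !b := by
  cases b
  · have hx : x = 0 := by
      by_contra hc
      exact absurd (h.mp hc) (by simp)
    simp [hx]
  · have hx : x ≠ 0 := h.mpr rfl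
    simp [hx]

theorem pvBoolFilter (x : Int) (b : Bool) (h : x ≠ 0 ↔ b = true)
    (hv : x = 0 ∨ x = 1 ∨ x = 2) : ((x != 1) && (x != 2)) = !b := by
  cases b
  · have hx : x = 0 := by
      by_contra hc
      exact absurd (h.mp hc) (by simp)
    simp [hx]
  · have hx : x ≠ 0 := h.mpr rfl
    rcases hv with hv | hv | hv
    · exact absurd hv hx
    · simp [hv]
    · simp [hv]

-- ===== VERDICT (by name: the statement is the Claim_ definition above) =====
theorem remainingMethods_spec : Claim_equal_remainingMethods := by
  intro n k inv hDom hPre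
  unfold Spec_remainingMethods
  have hmain := pvMain n k inv hPre
  simp only [remainingMethods, remainingMethods_alt]
  set len := n.toNat with hlen
  set g := pvGraph len inv with hg
  set S := dfsA g (len + 1) k (List.replicate len 0) with hSdef
  set R := loopB g len (List.replicate len false) [k] with hRdef
  have hany : (inv.any fun row =>
        (S.getD (pvIdx len (row.getD 1 0)) 0 != 0) && (S.getD (pvIdx len (row.getD 0 0)) 0 == 0)) =
      (inv.any fun row =>
        (R.getD (pvIdx len (row.getD 1 0)) false) && (!(R.getD (pvIdx len (row.getD 0 0)) false))) := by
    apply congrArg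
    funext row
    rw [pvBoolNe _ _ (hmain (pvIdx len (row.getD 1 0))).1,
        pvBoolEq _ _ (hmain (pvIdx len (row.getD 0 0))).1]
  have hfil : (List.filter (fun i => (S.getD (pvIdx len i) 0 != 1) && (S.getD (pvIdx len i) 0 != 2))
        (PySem.List.pyRange 0 n 1)) =
      (List.filter (fun i => !(R.getD (pvIdx len i) false)) (PySem.List.pyRange 0 n 1)) := by
    apply congrArg (fun p => List.filter p (PySem.List.pyRange 0 n 1))
    funext i
    rw [pvBoolFilter _ _ (hmain (pvIdx len i)).1 (hmain (pvIdx len i)).2]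
  rw [hany, hfil]
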